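-- pv_equiv track=rewrite | github.com/alexander78xzx-svg/Minimax-w-Alpha-Beta-pruning-checkers- | main.py | can_king_jump_again
-- ===== SOURCE A (Python) =====
-- def can_king_jump_again(board, r_start, c_start, enemy_ids):
--     directions = [(-1, -1), (-1, 1), (1, -1), (1, 1)]
--     for d_row, d_col in directions:
--         enemy_seen = False
--         for i in range(1, 8):
--             r = r_start + (d_row * i)
--             c = c_start + (d_col * i)
--
--             if not (0 <= r < 8 and 0 <= c < 8): break
--
--             cell = board[r][c]
--             if cell in enemy_ids:
--                 if enemy_seen: break
--                 enemy_seen = True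
--             elif cell == 0:
--                 if enemy_seen:
--                     return True
--             else:
--                 break
--     return False
-- ===== SOURCE B (Python) =====
-- def can_king_jump_again(board, r_start, c_start, enemy_ids):
--     # Find the first blocker on each diagonal, then probe the landing square behind it.
--     for d_row, d_col in ((-1, -1), (-1, 1), (1, -1), (1, 1)):
--         blocker = None
--         for k in range(1, 8):
--             r = r_start + d_row * k
--             c = c_start + d_col * k
--             if not (0 <= r < 8 and 0 <= c < 8):
--                 break
--             v = board[r][c]
--             if v in enemy_ids or v != 0:
--                 blocker = k
--                 break
--         if blocker is None or blocker == 7: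
--             continue
--         r = r_start + d_row * blocker
--         c = c_start + d_col * blocker
--         if board[r][c] not in enemy_ids:
--             continue
--         lr, lc = r + d_row, c + d_col
--         if 0 <= lr < 8 and 0 <= lc < 8 and board[lr][lc] not in enemy_ids and board[lr][lc] == 0:
--             return True
--     return False
-- ===== Notes on version B (the rewrite author's own statement) =====
-- stated objective: alternative
-- what changed: Replaces A's enemy_seen flag loop by a two-phase scan per diagonal: find the first non-empty (blocker) square, then, if the blocker is an enemy inside the 7-square window, probe the single landing square behind it.
-- outside the precondition, e.g. on can_king_jump_again([[0, 0, 0], [0, 2, 0], [0, 0, 0]], 2, 2, [2]): A returns True, B returns True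
import Mathlib
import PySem

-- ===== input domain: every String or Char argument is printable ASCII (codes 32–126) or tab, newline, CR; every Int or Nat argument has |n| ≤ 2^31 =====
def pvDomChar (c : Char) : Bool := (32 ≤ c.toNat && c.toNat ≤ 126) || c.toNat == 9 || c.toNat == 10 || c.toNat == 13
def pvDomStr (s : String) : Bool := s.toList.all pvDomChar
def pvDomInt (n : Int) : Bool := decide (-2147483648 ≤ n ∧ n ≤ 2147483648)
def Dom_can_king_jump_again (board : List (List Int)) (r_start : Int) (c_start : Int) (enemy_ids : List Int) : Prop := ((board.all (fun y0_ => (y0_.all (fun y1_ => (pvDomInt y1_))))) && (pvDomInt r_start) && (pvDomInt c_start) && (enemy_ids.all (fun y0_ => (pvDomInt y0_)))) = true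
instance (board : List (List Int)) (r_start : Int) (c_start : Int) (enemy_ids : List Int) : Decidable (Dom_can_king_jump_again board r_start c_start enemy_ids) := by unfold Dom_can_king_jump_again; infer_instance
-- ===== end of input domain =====

-- B replaces A's enemy_seen-flag scan by a per-diagonal "find the first blocker, then probe the
-- landing square behind it" decomposition (same cost; objective: alternative decomposition).

-- ===== PORT A =====
-- board[r][c]; exact whenever 0 ≤ r,c < the board's dimensions, which Pre_ (8×8 board) guarantees
-- at every access both ports make (both only read cells after the 0 ≤ r,c < 8 bounds test).
def pvCell (board : List (List Int)) (r c : Int) : Int :=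
  (PySem.List.pyGet? ((PySem.List.pyGet? board r).getD []) c).getD 0

-- A's inner loop: i runs over the remaining range(1,8) values, seen is the enemy_seen flag.
def pvALoop (board : List (List Int)) (rs cs dr dc : Int) (enemy : List Int) :
    List Int → Bool → Bool
  | [], _ => false
  | i :: rest, seen =>
    let r := rs + dr * i
    let c := cs + dc * i
    if ¬(0 ≤ r ∧ r < 8 ∧ 0 ≤ c ∧ c < 8) then false
    else
      let cell := pvCell board r c
      if enemy.contains cell then
        (if seen then false else pvALoop board rs cs dr dc enemy rest true)
      else if cell = 0 then
        (if seen then true else pvALoop board rs cs dr dc enemy rest seen)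
      else false

def can_king_jump_again (board : List (List Int)) (r_start : Int) (c_start : Int) (enemy_ids : List Int) : Bool :=
  [((-1 : Int), (-1 : Int)), (-1, 1), (1, -1), (1, 1)].any fun d =>
    pvALoop board r_start c_start d.1 d.2 enemy_ids (PySem.List.pyRange 1 8 1) false

-- ===== PORT B =====
-- B's inner loop: index of the first in-bounds square (distance 1..7) holding a blocker
-- (an enemy id or a non-zero cell); none if the diagonal leaves the board first or stays empty.
def pvBlocker (board : List (List Int)) (rs cs dr dc : Int) (enemy : List Int) :
    List Int → Option Int
  | [] => none
  | k :: rest =>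
    let r := rs + dr * k
    let c := cs + dc * k
    if ¬(0 ≤ r ∧ r < 8 ∧ 0 ≤ c ∧ c < 8) then none
    else
      let v := pvCell board r c
      if enemy.contains v || decide (v ≠ 0) then some k
      else pvBlocker board rs cs dr dc enemy rest

-- B's per-direction test: find the blocker, then probe the landing square behind it.
def pvBDir (board : List (List Int)) (rs cs dr dc : Int) (enemy : List Int) : Bool :=
  match pvBlocker board rs cs dr dc enemy (PySem.List.pyRange 1 8 1) with
  | none => false
  | some m =>
    if m = 7 then false
    else
      let r := rs + dr * m
      let c := cs + dc * m
      if ¬ enemy.contains (pvCell board r c) then false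
      else
        let lr := r + dr
        let lc := c + dc
        decide (0 ≤ lr ∧ lr < 8 ∧ 0 ≤ lc ∧ lc < 8)
          && !(enemy.contains (pvCell board lr lc))
          && (pvCell board lr lc == 0)

def can_king_jump_again_alt (board : List (List Int)) (r_start : Int) (c_start : Int) (enemy_ids : List Int) : Bool :=
  [((-1 : Int), (-1 : Int)), (-1, 1), (1, -1), (1, 1)].any fun d =>
    pvBDir board r_start c_start d.1 d.2 enemy_ids

-- ===== PRECONDITION & SPEC =====
-- Pre_ is the closed-form no-IndexError condition: whenever a diagonal square within jumping
-- distance (1..7) of the start is in range 0..7 but missing from the (possibly ragged) board list,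
-- some earlier square of that diagonal must stop the scan first (it is out of range, or holds a
-- friendly piece, or holds an enemy more than one step before the missing square).  It also
-- excludes the inputs where A only avoids that IndexError by returning True from an earlier
-- direction (e.g. the cite below, where A and B both return True before ever reaching the gap).
def Pre_can_king_jump_again (board : List (List Int)) (r_start : Int) (c_start : Int) (enemy_ids : List Int) : Prop :=
  ∀ d ∈ [((-1 : Int), (-1 : Int)), (-1, 1), (1, -1), (1, 1)], ∀ k ∈ ([1, 2, 3, 4, 5, 6, 7] : List Int),
    ((0 ≤ r_start + d.1 * k ∧ r_start + d.1 * k < 8 ∧ 0 ≤ c_start + d.2 * k ∧ c_start + d.2 * k < 8) ∧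
      ¬((r_start + d.1 * k).toNat < board.length ∧
        (c_start + d.2 * k).toNat < (board.getD (r_start + d.1 * k).toNat []).length)) →
    ∃ m ∈ ([1, 2, 3, 4, 5, 6, 7] : List Int), m < k ∧
      (¬(0 ≤ r_start + d.1 * m ∧ r_start + d.1 * m < 8 ∧ 0 ≤ c_start + d.2 * m ∧ c_start + d.2 * m < 8) ∨
        (((r_start + d.1 * m).toNat < board.length ∧
          (c_start + d.2 * m).toNat < (board.getD (r_start + d.1 * m).toNat []).length) ∧
          ((pvCell board (r_start + d.1 * m) (c_start + d.2 * m) ∉ enemy_ids ∧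
              pvCell board (r_start + d.1 * m) (c_start + d.2 * m) ≠ 0) ∨
            (pvCell board (r_start + d.1 * m) (c_start + d.2 * m) ∈ enemy_ids ∧ m < k - 1))))
instance (board : List (List Int)) (r_start : Int) (c_start : Int) (enemy_ids : List Int) : Decidable (Pre_can_king_jump_again board r_start c_start enemy_ids) := by unfold Pre_can_king_jump_again; infer_instance

def pvWitness_can_king_jump_again : List (List Int) × Int × Int × List Int :=
  ([[0,0,0,0,0,0,0,0],[0,0,0,0,0,0,0,0],[0,0,0,0,0,0,0,0],[0,0,0,0,0,0,0,0],
    [0,0,0,0,0,0,0,0],[0,0,0,0,0,0,0,0],[0,0,0,0,0,0,0,0],[0,0,0,0,0,0,0,0]], 0, 0, [1])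

def Spec_can_king_jump_again (board : List (List Int)) (r_start : Int) (c_start : Int) (enemy_ids : List Int) (out : Bool) : Prop := out = can_king_jump_again_alt board r_start c_start enemy_ids
instance (board : List (List Int)) (r_start : Int) (c_start : Int) (enemy_ids : List Int) (out : Bool) : Decidable (Spec_can_king_jump_again board r_start c_start enemy_ids out) := by unfold Spec_can_king_jump_again; infer_instance

-- ===== CLAIM (what is proved, stated in full; the proofs are below) =====
def Claim_equal_can_king_jump_again : Prop := ∀ (board : List (List Int)) (r_start : Int) (c_start : Int) (enemy_ids : List Int), Dom_can_king_jump_again board r_start c_start enemy_ids → Pre_can_king_jump_again board r_start c_start enemy_ids → Spec_can_king_jump_again board r_start c_start enemy_ids (can_king_jump_again board r_start c_start enemy_ids)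

-- ===== LEMMAS AND PROOFS =====

-- the list of n consecutive integers starting at k; pyRange 1 8 1 is pvIR 1 7
def pvIR (k : Int) : Nat → List Int
  | 0 => []
  | n + 1 => k :: pvIR (k + 1) n

theorem pvRange17 : PySem.List.pyRange 1 8 1 = pvIR 1 7 := by decide

-- the value both per-direction scans compute from the blocker result, window end (exclusive) hi
def pvRes (board : List (List Int)) (rs cs dr dc : Int) (enemy : List Int) (hi : Int) :
    Option Int → Bool
  | none => false
  | some m =>
    if ¬(0 ≤ rs + dr * m ∧ rs + dr * m < 8 ∧ 0 ≤ cs + dc * m ∧ cs + dc * m < 8) then false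
    else if ¬ enemy.contains (pvCell board (rs + dr * m) (cs + dc * m)) then false
    else if hi ≤ m + 1 then false
    else
      decide (0 ≤ rs + dr * (m+1) ∧ rs + dr * (m+1) < 8 ∧ 0 ≤ cs + dc * (m+1) ∧ cs + dc * (m+1) < 8)
        && !(enemy.contains (pvCell board (rs + dr * (m+1)) (cs + dc * (m+1))))
        && (pvCell board (rs + dr * (m+1)) (cs + dc * (m+1)) == 0)

-- A's loop, started with the flag off, is determined by the first blocker of the window
theorem pvALoop_char (board : List (List Int)) (rs cs dr dc : Int) (enemy : List Int) :
    ∀ (n : Nat) (k : Int),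
      pvALoop board rs cs dr dc enemy (pvIR k n) false =
        pvRes board rs cs dr dc enemy (k + n)
          (pvBlocker board rs cs dr dc enemy (pvIR k n)) := by
  intro n
  induction n with
  | zero => intro k; simp [pvIR, pvALoop, pvBlocker, pvRes]
  | succ n ih =>
    intro k
    by_cases hin : (0 ≤ rs + dr * k ∧ rs + dr * k < 8 ∧ 0 ≤ cs + dc * k ∧ cs + dc * k < 8)
    · by_cases hen : pvCell board (rs + dr * k) (cs + dc * k) ∈ enemy
      · have hbl : pvBlocker board rs cs dr dc enemy (pvIR k (n+1)) = some k := by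
          simp [pvIR, pvBlocker, hin, hen]
        rw [hbl]
        cases n with
        | zero =>
          have h1 : (k + ((0:Nat) + 1 : Nat) : Int) ≤ k + 1 := by push_cast; omega
          simp [pvIR, pvALoop, pvRes, hin, hen, h1]
        | succ n' =>
          have h1 : ¬ ((k + ((n' + 1 : Nat) + 1 : Nat) : Int) ≤ k + 1) := by push_cast; omega
          by_cases hin2 : (0 ≤ rs + dr * (k+1) ∧ rs + dr * (k+1) < 8 ∧ 0 ≤ cs + dc * (k+1) ∧ cs + dc * (k+1) < 8)
          · by_cases hen2 : pvCell board (rs + dr * (k+1)) (cs + dc * (k+1)) ∈ enemy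
            · simp [pvIR, pvALoop, pvRes, hin, hen, hin2, hen2, h1]
            · by_cases hz2 : pvCell board (rs + dr * (k+1)) (cs + dc * (k+1)) = 0
              · simp [pvIR, pvALoop, pvRes, hin, hen, hin2, hen2, hz2, h1]
              · simp [pvIR, pvALoop, pvRes, hin, hen, hin2, hen2, hz2, h1]
          · simp [pvIR, pvALoop, pvRes, hin, hen, hin2, h1]
      · by_cases hz : pvCell board (rs + dr * k) (cs + dc * k) = 0
        · have hz0 : (0 : Int) ∉ enemy := hz ▸ hen
          have hstep : pvALoop board rs cs dr dc enemy (pvIR k (n+1)) false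
              = pvALoop board rs cs dr dc enemy (pvIR (k+1) n) false := by
            simp [pvIR, pvALoop, hin, hen, hz, hz0]
          have hbl : pvBlocker board rs cs dr dc enemy (pvIR k (n+1))
              = pvBlocker board rs cs dr dc enemy (pvIR (k+1) n) := by
            simp [pvIR, pvBlocker, hin, hen, hz, hz0]
          rw [hstep, hbl, ih (k+1)]
          congr 1
          push_cast; ring
        · simp [pvIR, pvALoop, pvBlocker, pvRes, hin, hen, hz]
    · simp [pvIR, pvALoop, pvBlocker, pvRes, hin]

-- the blocker, when found, lies in the window and is in bounds
theorem pvBlocker_sound (board : List (List Int)) (rs cs dr dc : Int) (enemy : List Int) :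
    ∀ (n : Nat) (k m : Int), pvBlocker board rs cs dr dc enemy (pvIR k n) = some m →
      k ≤ m ∧ m < k + n ∧
        (0 ≤ rs + dr * m ∧ rs + dr * m < 8 ∧ 0 ≤ cs + dc * m ∧ cs + dc * m < 8) := by
  intro n
  induction n with
  | zero => intro k m h; simp [pvIR, pvBlocker] at h
  | succ n ih =>
    intro k m h
    by_cases hin : (0 ≤ rs + dr * k ∧ rs + dr * k < 8 ∧ 0 ≤ cs + dc * k ∧ cs + dc * k < 8)
    · by_cases hb : (pvCell board (rs + dr * k) (cs + dc * k) ∈ enemy ∨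
          pvCell board (rs + dr * k) (cs + dc * k) ≠ 0)
      · have hk : m = k := by
          simp [pvIR, pvBlocker, hin, hb] at h
          omega
        subst hk
        refine ⟨le_refl _, by push_cast; omega, hin⟩
      · have h' : pvBlocker board rs cs dr dc enemy (pvIR (k+1) n) = some m := by
          simpa [pvIR, pvBlocker, hin, not_or.mp hb] using h
        obtain ⟨h1, h2, h3⟩ := ih (k+1) m h'
        exact ⟨by omega, by push_cast at h2 ⊢; omega, h3⟩
    · simp [pvIR, pvBlocker, hin] at h

-- per-direction equivalence of the two scans
theorem pvDir_eq (board : List (List Int)) (rs cs dr dc : Int) (enemy : List Int) :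
    pvALoop board rs cs dr dc enemy (PySem.List.pyRange 1 8 1) false =
      pvBDir board rs cs dr dc enemy := by
  rw [pvRange17, pvALoop_char]
  unfold pvBDir
  rw [pvRange17]
  cases hbl : pvBlocker board rs cs dr dc enemy (pvIR 1 7) with
  | none => simp [pvRes]
  | some m =>
    obtain ⟨hm1, hm2, hin⟩ := pvBlocker_sound board rs cs dr dc enemy 7 1 m hbl
    by_cases hen : pvCell board (rs + dr * m) (cs + dc * m) ∈ enemy
    · by_cases h7 : m = 7
      · have hhi : (1 + ((7:Nat)) : Int) ≤ m + 1 := by push_cast; omega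
        simp [pvRes, hin, hen, h7, hhi]
      · have hhi : ¬ ((1 + ((7:Nat)) : Int) ≤ m + 1) := by push_cast at hm2 ⊢; omega
        have hr : rs + dr * (m + 1) = rs + dr * m + dr := by ring
        have hc : cs + dc * (m + 1) = cs + dc * m + dc := by ring
        simp [pvRes, hin, hen, h7, hhi, hr, hc]
        intros; omega
    · simp [pvRes, hin, hen]

-- ===== VERDICT (by name: the statement is the Claim_ definition above) =====
theorem can_king_jump_again_spec : Claim_equal_can_king_jump_again := by
  intro board rs cs enemy _ _
  unfold Spec_can_king_jump_again can_king_jump_again can_king_jump_again_alt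
  simp only [List.any_cons, List.any_nil]
  rw [pvDir_eq, pvDir_eq, pvDir_eq, pvDir_eq]
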